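-- pv_equiv track=rewrite | github.com/WuQianyong/Spider_demo | natural_language_processing/nltk_chapter4.py | vira1
-- ===== SOURCE A (Python) =====
-- def vira1(n):
--     """
--     迭代法
--     :param n:
--     :return:
--     """
--     if n == 0:
--         return ['']
--     elif n == 1:
--         return ['S']
--     else:
--         s = ['S' + prosody for prosody in vira1(n - 1)]
--         l = ['L' + prosody for prosody in vira1(n - 2)]
--         return s + l
-- ===== SOURCE B (Python) =====
-- def vira1(n):
--     """Bottom-up DP: build the table of rows 0..n once instead of exponential recursion."""
--     table = [[''], ['S']]
--     for i in range(2, n + 1):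
--         table.append(['S' + p for p in table[i - 1]] + ['L' + p for p in table[i - 2]])
--     return table[n]
-- ===== Notes on version B (the rewrite author's own statement) =====
-- stated objective: alternative
-- what changed: Replaces the exponential double recursion by a bottom-up dynamic-programming table built once, reading the requested row off at the end.
import Mathlib
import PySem

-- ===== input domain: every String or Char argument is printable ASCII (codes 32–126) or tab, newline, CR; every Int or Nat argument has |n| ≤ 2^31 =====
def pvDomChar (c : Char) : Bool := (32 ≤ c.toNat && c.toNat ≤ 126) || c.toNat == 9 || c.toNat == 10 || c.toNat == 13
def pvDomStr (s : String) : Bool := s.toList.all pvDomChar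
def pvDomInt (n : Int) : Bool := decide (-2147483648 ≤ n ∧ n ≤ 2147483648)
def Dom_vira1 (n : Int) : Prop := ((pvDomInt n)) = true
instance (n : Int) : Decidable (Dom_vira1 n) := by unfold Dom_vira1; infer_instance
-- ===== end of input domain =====

-- B replaces A's exponential double recursion by a bottom-up table built once (DP), row n read off at the end.

-- ===== PORT A =====
-- fuel makes the Int recursion total; n.toNat+1 fuel suffices for every n ≥ 0 (Python diverges on negative n, excluded by Pre_)
def vira1Fuel : Nat → Int → List String
  | 0, _ => []
  | f + 1, n =>
    if n == 0 then [""]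
    else if n == 1 then ["S"]
    else
      (vira1Fuel f (n - 1)).map (fun p => "S" ++ p) ++ (vira1Fuel f (n - 2)).map (fun p => "L" ++ p)

def vira1 (n : Int) : List String := vira1Fuel (n.toNat + 1) n

-- ===== PORT B =====
-- table[i-1]/table[i-2]/table[n] ported with pyGetD (exact wherever Python's indexing returns; Python raises
-- IndexError on the more negative indices, outside Pre_)
def vira1_alt (n : Int) : List String :=
  let table : List (List String) :=
    (PySem.List.pyRange 2 (n + 1) 1).foldl
      (fun t i =>
        t ++ [(PySem.List.pyGetD t (i - 1) []).map (fun p => "S" ++ p) ++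
              (PySem.List.pyGetD t (i - 2) []).map (fun p => "L" ++ p)])
      [[""], ["S"]]
  PySem.List.pyGetD table n []

-- ===== PRECONDITION & SPEC =====
-- A recurses without end (RecursionError) on negative inputs, so those are excluded.
def Pre_vira1 (n : Int) : Prop := 0 ≤ n
instance (n : Int) : Decidable (Pre_vira1 n) := by unfold Pre_vira1; infer_instance
def pvWitness_vira1 : Int := 5
def Spec_vira1 (n : Int) (out : List String) : Prop := out = vira1_alt n
instance (n : Int) (out : List String) : Decidable (Spec_vira1 n out) := by unfold Spec_vira1; infer_instance

-- ===== CLAIM (what is proved, stated in full; the proofs are below) =====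
def Claim_equal_vira1 : Prop := ∀ (n : Int), Dom_vira1 n → Pre_vira1 n → Spec_vira1 n (vira1 n)

-- ===== LEMMAS AND PROOFS =====

-- the mathematical reference function, by structural recursion on Nat
def viraF : Nat → List String
  | 0 => [""]
  | 1 => ["S"]
  | k + 2 => (viraF (k + 1)).map (fun p => "S" ++ p) ++ (viraF k).map (fun p => "L" ++ p)

theorem vira1Fuel_eq (f : Nat) : ∀ (m : Nat), m < f → vira1Fuel f (m : Int) = viraF m := by
  induction f with
  | zero => intro m h; omega
  | succ f ih =>
    intro m hm
    match m with
    | 0 => simp [vira1Fuel, viraF]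
    | 1 => simp [vira1Fuel, viraF]
    | k + 2 =>
      have h1 : ((k + 2 : Nat) : Int) - 1 = ((k + 1 : Nat) : Int) := by push_cast; ring
      have h2 : ((k + 2 : Nat) : Int) - 2 = ((k : Nat) : Int) := by push_cast; ring
      have hz : ¬ (((k + 2 : Nat) : Int) == 0) = true := by simp; omega
      have ho : ¬ (((k + 2 : Nat) : Int) == 1) = true := by simp; omega
      simp only [vira1Fuel, hz, ho, h1, h2,
        ih (k + 1) (by omega), ih k (by omega)]
      rfl

-- B's loop body, named for the proofs
def tblStep (t : List (List String)) (i : Int) : List (List String) :=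
  t ++ [(PySem.List.pyGetD t (i - 1) []).map (fun p => "S" ++ p) ++
        (PySem.List.pyGetD t (i - 2) []).map (fun p => "L" ++ p)]

theorem getD_range_map (M j : Nat) (hj : j < M) :
    PySem.List.pyGetD ((List.range M).map viraF) ((j : Nat) : Int) [] = viraF j := by
  rw [PySem.List.pyGetD_natCast]
  simp [List.getD, hj]

theorem tblStep_range (m : Nat) (hm : 2 ≤ m) :
    tblStep ((List.range m).map viraF) ((m : Nat) : Int) = (List.range (m + 1)).map viraF := by
  obtain ⟨k, rfl⟩ : ∃ k, m = k + 2 := ⟨m - 2, by omega⟩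
  have h1 : ((k + 2 : Nat) : Int) - 1 = ((k + 1 : Nat) : Int) := by push_cast; ring
  have h2 : ((k + 2 : Nat) : Int) - 2 = ((k : Nat) : Int) := by push_cast; ring
  unfold tblStep
  rw [h1, h2, getD_range_map _ _ (by omega), getD_range_map _ _ (by omega)]
  simp [List.range_succ, viraF]

theorem foldl_tblStep (k : Nat) : ∀ (a : Int) (m : Nat), a = (m : Int) → 2 ≤ m →
    (PySem.List.pyRange a (a + (k : Int)) 1).foldl tblStep
      ((List.range m).map viraF) = (List.range (m + k)).map viraF := by
  induction k with
  | zero => intro a m ha hm; rw [PySem.List.pyRange_one_eq_nil (by simp)]; simp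
  | succ k ih =>
    intro a m ha hm
    subst ha
    rw [PySem.List.pyRange_one_cons (by push_cast; omega), List.foldl_cons, tblStep_range m hm]
    rw [show ((m : Int) + ((k + 1 : Nat) : Int)) = ((m : Int) + 1) + (k : Int) by push_cast; ring]
    rw [ih ((m : Int) + 1) (m + 1) (by push_cast; ring) (by omega),
      show m + 1 + k = m + (k + 1) from by omega]

-- ===== VERDICT (by name: the statement is the Claim_ definition above) =====
theorem vira1_spec : Claim_equal_vira1 := by
  intro n _ hpre
  unfold Spec_vira1
  obtain ⟨m, rfl⟩ : ∃ m : Nat, n = (m : Int) := ⟨n.toNat, (Int.toNat_of_nonneg hpre).symm⟩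
  have hA : vira1 (m : Int) = viraF m := by
    unfold vira1
    rw [Int.toNat_natCast]
    exact vira1Fuel_eq (m + 1) m (by omega)
  rw [hA]
  show viraF m = PySem.List.pyGetD
    ((PySem.List.pyRange 2 ((m : Int) + 1) 1).foldl
      (fun t i =>
        t ++ [(PySem.List.pyGetD t (i - 1) []).map (fun p => "S" ++ p) ++
              (PySem.List.pyGetD t (i - 2) []).map (fun p => "L" ++ p)])
      [[""], ["S"]]) (m : Int) []
  have hstep : (fun (t : List (List String)) (i : Int) =>
        t ++ [(PySem.List.pyGetD t (i - 1) []).map (fun p => "S" ++ p) ++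
              (PySem.List.pyGetD t (i - 2) []).map (fun p => "L" ++ p)]) = tblStep := rfl
  have hinit : ([[""], ["S"]] : List (List String)) = (List.range 2).map viraF := rfl
  rw [hstep, hinit]
  rcases Nat.lt_or_ge m 2 with hlt | hge
  · interval_cases m <;>
      (rw [PySem.List.pyRange_one_eq_nil (by omega)]; simp [List.foldl]; rfl)
  · obtain ⟨k, rfl⟩ : ∃ k, m = 2 + k := ⟨m - 2, by omega⟩
    have h2 : ((2 + k : Nat) : Int) + 1 = (2 : Int) + ((k + 1 : Nat) : Int) := by
      push_cast; ring
    rw [h2, foldl_tblStep (k + 1) 2 2 (by norm_num) (by omega)]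
    rw [getD_range_map (2 + (k + 1)) (2 + k) (by omega)]
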